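-- pv_equiv track=rewrite | github.com/AlexanderBedrosyan/Programming-Fundamentals-with-Python | Text Processing - More Exercises/treasure_finder_1.py | original_text
-- ===== SOURCE A (Python) =====
-- def original_text(text_list, code):
--     code_counter = -1
--     original_text = ""
--
--     for i in range(len(text_list)):
--         code_counter += 1
--         original_text += chr(ord(text_list[i]) - int(code[code_counter]))
--         if len(code) - 1 == code_counter:
--             code_counter = -1
--
--     return original_text
-- ===== SOURCE B (Python) =====
-- def original_text(text_list, code):
--     if not text_list:
--         return ""
--     return "".join(
--         chr(ord(c) - int(k))
--         for i in range(0, len(text_list), len(code))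
--         for c, k in zip(text_list[i:i + len(code)], code)
--     )
-- ===== Notes on version B (the rewrite author's own statement) =====
-- stated objective: alternative
-- what changed: B splits the text into code-length blocks and decodes each block by zipping it directly with the code string, instead of A's per-character loop with a manually incremented-and-reset cyclic counter and string += accumulation.
import Mathlib
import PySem

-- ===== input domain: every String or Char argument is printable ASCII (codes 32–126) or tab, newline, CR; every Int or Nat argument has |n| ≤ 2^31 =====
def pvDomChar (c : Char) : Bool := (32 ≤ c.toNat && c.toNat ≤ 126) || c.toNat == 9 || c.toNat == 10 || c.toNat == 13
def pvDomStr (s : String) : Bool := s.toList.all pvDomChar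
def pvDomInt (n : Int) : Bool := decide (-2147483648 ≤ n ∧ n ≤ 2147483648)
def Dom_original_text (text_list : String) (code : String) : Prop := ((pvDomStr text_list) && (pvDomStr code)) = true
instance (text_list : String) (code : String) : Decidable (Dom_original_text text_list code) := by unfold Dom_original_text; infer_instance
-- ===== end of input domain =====

-- B decodes the text block-by-block (code-length slices zipped with the code string) instead of
-- A's per-character loop with a manually reset cyclic counter and += accumulation; equal on Pre_.

-- ===== PORT A =====
-- loop body of A, as a named helper (counter increment, decode one char, reset check)
def pvStepA (cs : List Char) (st : Int × List Char) (c : Char) : Int × List Char :=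
  let code_counter := st.1 + 1
  let ch := Char.ofNat ((((c.toNat : Int))
      - (PySem.Int.ofChars? [PySem.List.pyGetD cs code_counter '0']).getD 0).toNat)
  let acc := st.2 ++ [ch]
  if (cs.length : Int) - 1 = code_counter then (-1, acc) else (code_counter, acc)

def original_text (text_list : String) (code : String) : String :=
  String.mk ((PySem.List.pyRange 0 (text_list.toList.length : Int) 1).foldl
    (fun st i => pvStepA code.toList st (PySem.List.pyGetD text_list.toList i ' ')) (-1, [])).2

-- ===== PORT B =====
-- B's per-pair decoder: chr(ord(c) - int(k)) for a zipped pair (c, k)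
def pvDecPair (p : Char × Char) : Char :=
  Char.ofNat ((((p.1.toNat : Int)) - (PySem.Int.ofChars? [p.2]).getD 0).toNat)

def original_text_alt (text_list : String) (code : String) : String :=
  if text_list.toList = [] then "" else
  String.mk (((PySem.List.pyRange 0 (text_list.toList.length : Int) (code.toList.length : Int)).map
      (fun i => ((PySem.List.slice text_list.toList (some i) (some (i + (code.toList.length : Int)))).zip
          code.toList).map pvDecPair)).flatten)

-- ===== PRECONDITION & SPEC =====
-- Pre_ excludes exactly the inputs where A raises: an empty code with non-empty text (IndexError),
-- and inputs where some code digit actually consumed by the cycle is not an ASCII digit (ValueError from int()).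
def Pre_original_text (text_list : String) (code : String) : Prop :=
  (text_list.toList ≠ [] → code.toList ≠ []) ∧
  (code.toList.take text_list.toList.length).all PySem.Chars.isdigit = true
instance (text_list : String) (code : String) : Decidable (Pre_original_text text_list code) := by
  unfold Pre_original_text; infer_instance

def pvWitness_original_text : String × String := ("abc", "12")

def Spec_original_text (text_list : String) (code : String) (out : String) : Prop := out = original_text_alt text_list code
instance (text_list : String) (code : String) (out : String) : Decidable (Spec_original_text text_list code out) := by unfold Spec_original_text; infer_instance

-- ===== CLAIM (what is proved, stated in full; the proofs are below) =====
def Claim_equal_original_text : Prop := ∀ (text_list : String) (code : String), Dom_original_text text_list code → Pre_original_text text_list code → Spec_original_text text_list code (original_text text_list code)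

-- ===== LEMMAS AND PROOFS =====

-- proof-side abstraction of one decoded character at absolute position p.1 (cyclic index = mod)
def pvDecB (cs : List Char) (p : Int × Char) : Char :=
  Char.ofNat ((((p.2.toNat : Int))
      - (PySem.Int.ofChars? [PySem.List.pyGetD cs (PySem.Int.mod p.1 (cs.length : Int)) '0']).getD 0).toNat)

lemma pv_succ_mod (k len : Nat) (h : 0 < len) :
    (k + 1) % len = if k % len = len - 1 then 0 else k % len + 1 := by
  have hk : k % len < len := Nat.mod_lt _ h
  by_cases he : k % len = len - 1
  · rw [if_pos he]
    have h2 : (k + 1) % len = (k % len + 1) % len := by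
      conv_lhs => rw [← Nat.mod_add_mod]
    rw [h2, he, (by omega : len - 1 + 1 = len), Nat.mod_self]
  · rw [if_neg he]
    have : (k + 1) % len = (k % len + 1) % len := by
      conv_lhs => rw [← Nat.mod_add_mod]
    rw [this, Nat.mod_eq_of_lt (by omega)]

-- A's foldl computes the mod-indexed decode of every character
lemma pv_key (cs : List Char) (hcs : cs ≠ []) :
    ∀ (ts : List Char) (k : Nat) (acc : List Char),
      (ts.foldl (pvStepA cs) (((k % cs.length : Nat) : Int) - 1, acc)).2
        = acc ++ (PySem.List.enumerate ts (k : Int)).map (pvDecB cs) := by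
  intro ts
  induction ts with
  | nil => intro k acc; simp [PySem.List.enumerate]
  | cons x ts ih =>
    intro k acc
    have hlen : 0 < cs.length := List.length_pos_iff.mpr hcs
    have hk : k % cs.length < cs.length := Nat.mod_lt _ hlen
    simp only [List.foldl_cons, PySem.List.enumerate_cons, List.map_cons]
    have hstep : pvStepA cs (((k % cs.length : Nat) : Int) - 1, acc) x
        = (((((k+1) % cs.length : Nat) : Int)) - 1,
           acc ++ [pvDecB cs ((k : Int), x)]) := by
      unfold pvStepA pvDecB
      have hcc : ((k % cs.length : Nat) : Int) - 1 + 1 = ((k % cs.length : Nat) : Int) := by ring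
      have hmod : PySem.Int.mod (k : Int) (cs.length : Int) = ((k % cs.length : Nat) : Int) := by
        simp
      simp only [hcc, hmod]
      by_cases he : k % cs.length = cs.length - 1
      · have h1 : ((cs.length : Int)) - 1 = ((k % cs.length : Nat) : Int) := by
          rw [he]; omega
        rw [if_pos h1, pv_succ_mod k cs.length hlen, if_pos he]
        norm_num
      · have h1 : ¬ ((cs.length : Int)) - 1 = ((k % cs.length : Nat) : Int) := by
          intro hcon; apply he; omega
        rw [if_neg h1, pv_succ_mod k cs.length hlen, if_neg he]
        push_cast
        congr 1
        ring
    rw [hstep]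
    have := ih (k + 1) (acc ++ [pvDecB cs ((k : Int), x)])
    push_cast at this ⊢
    rw [this]
    simp

-- enumerate splits over append
lemma pv_enum_append (xs ys : List Char) : ∀ (s : Int),
    PySem.List.enumerate (xs ++ ys) s
      = PySem.List.enumerate xs s ++ PySem.List.enumerate ys (s + xs.length) := by
  induction xs with
  | nil => intro s; simp [PySem.List.enumerate]
  | cons x xs ih =>
    intro s
    simp only [List.cons_append, PySem.List.enumerate_cons, ih (s + 1), List.length_cons]
    have h1 : s + 1 + (xs.length : Int) = s + (((xs.length + 1 : Nat)) : Int) := by push_cast; ring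
    rw [h1]

-- shifting the start by the code length does not change the decoded characters
lemma pv_shift (cs : List Char) (hcs : cs ≠ []) : ∀ (ts : List Char) (k : Int),
    (PySem.List.enumerate ts (k + cs.length)).map (pvDecB cs)
      = (PySem.List.enumerate ts k).map (pvDecB cs) := by
  intro ts
  induction ts with
  | nil => intro k; simp [PySem.List.enumerate]
  | cons x ts ih =>
    intro k
    simp only [PySem.List.enumerate_cons, List.map_cons]
    have hlen : 0 < cs.length := List.length_pos_iff.mpr hcs
    have hpos : (0 : Int) < (cs.length : Int) := by exact_mod_cast hlen
    have hmod : PySem.Int.mod (k + cs.length) (cs.length : Int) = PySem.Int.mod k (cs.length : Int) := by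
      rw [PySem.Int.mod_eq_emod_of_pos hpos, PySem.Int.mod_eq_emod_of_pos hpos]
      simp
    have h1 : k + (cs.length : Int) + 1 = k + 1 + (cs.length : Int) := by ring
    rw [h1, ih (k + 1)]
    unfold pvDecB
    rw [hmod]

-- a block shorter than the code decodes as a zip against the code suffix
lemma pv_chunk (cs : List Char) : ∀ (us : List Char) (k : Nat),
    k + us.length ≤ cs.length →
    (PySem.List.enumerate us (k : Int)).map (pvDecB cs) = (us.zip (cs.drop k)).map pvDecPair := by
  intro us
  induction us with
  | nil => intro k h; simp [PySem.List.enumerate]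
  | cons u us ih =>
    intro k h
    simp only [List.length_cons] at h
    have hk : k < cs.length := by omega
    rw [List.drop_eq_getElem_cons hk]
    simp only [PySem.List.enumerate_cons, List.map_cons, List.zip_cons_cons]
    have h1 : (k : Int) + 1 = ((k + 1 : Nat) : Int) := by push_cast; ring
    rw [h1, ih (k + 1) (by omega)]
    have hhead : pvDecB cs ((k : Int), u) = pvDecPair (u, cs[k]) := by
      unfold pvDecB pvDecPair
      have hmod : PySem.Int.mod (k : Int) (cs.length : Int) = (k : Int) := by
        simp [Nat.mod_eq_of_lt hk]
      rw [hmod]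
      simp [PySem.List.pyGetD_natCast, List.getElem?_eq_getElem hk]
    rw [hhead]

-- one step of the block decomposition on the A side
lemma pv_peelA (cs : List Char) (hcs : cs ≠ []) (ts : List Char) :
    (PySem.List.enumerate ts (0 : Int)).map (pvDecB cs)
      = ((ts.take cs.length).zip cs).map pvDecPair
        ++ (PySem.List.enumerate (ts.drop cs.length) (0 : Int)).map (pvDecB cs) := by
  conv_lhs => rw [← List.take_append_drop cs.length ts, pv_enum_append]
  rw [List.map_append]
  congr 1
  · have := pv_chunk cs (ts.take cs.length) 0 (by simp)
    simpa using this
  · by_cases hle : ts.length ≤ cs.length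
    · simp [List.drop_eq_nil_of_le hle]
    · have hlen : (ts.take cs.length).length = cs.length := by
        simp [Nat.min_eq_left (by omega : cs.length ≤ ts.length)]
      rw [hlen]
      have := pv_shift cs hcs (ts.drop cs.length) 0
      simpa using this

-- B's body, abbreviated for the lemmas
def pvBodyB (cs ts : List Char) : List Char :=
  ((PySem.List.pyRange 0 (ts.length : Int) (cs.length : Int)).map
      (fun i => ((PySem.List.slice ts (some i) (some (i + (cs.length : Int)))).zip cs).map pvDecPair)).flatten

-- one step of the block decomposition on the B side
lemma pv_peelB (cs : List Char) (hcs : cs ≠ []) (ts : List Char) (hts : ts ≠ []) :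
    pvBodyB cs ts = ((ts.take cs.length).zip cs).map pvDecPair ++ pvBodyB cs (ts.drop cs.length) := by
  have hm : 0 < cs.length := List.length_pos_iff.mpr hcs
  have hm' : (0 : Int) < (cs.length : Int) := by exact_mod_cast hm
  have hn : 0 < ts.length := List.length_pos_iff.mpr hts
  have hn' : (0 : Int) < (ts.length : Int) := by exact_mod_cast hn
  -- the block counts on the two sides
  set m : Nat := cs.length with hmdef
  set N2 : Nat := (if (0 : Int) < (((ts.drop m).length : Nat) : Int)
      then (((((ts.drop m).length : Nat) : Int) - 0 + (m : Int) - 1) / (m : Int)).toNat else 0) with hN2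
  have hsplit : (if (0 : Int) < (ts.length : Int)
      then (((ts.length : Int) - 0 + (m : Int) - 1) / (m : Int)).toNat else 0) = N2 + 1 := by
    rw [if_pos hn']
    rw [hN2]
    by_cases hle : ts.length ≤ m
    · rw [if_neg (by simp [List.drop_eq_nil_of_le hle])]
      have h1 : ((ts.length : Int) - 0 + (m : Int) - 1) / (m : Int) = 1 := by
        have hub : (ts.length : Int) - 0 + (m : Int) - 1 < 2 * (m : Int) := by
          have : (ts.length : Int) ≤ (m : Int) := by exact_mod_cast hle
          omega
        have hlb : 1 * (m : Int) ≤ (ts.length : Int) - 0 + (m : Int) - 1 := by omega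
        have h2 : 1 ≤ ((ts.length : Int) - 0 + (m : Int) - 1) / (m : Int) :=
          (Int.le_ediv_iff_mul_le hm').mpr hlb
        have h3 : ((ts.length : Int) - 0 + (m : Int) - 1) / (m : Int) < 2 :=
          (Int.ediv_lt_iff_lt_mul hm').mpr (by omega)
        omega
      rw [h1]; rfl
    · have hmlt : m ≤ ts.length := by omega
      have hd : (((ts.drop m).length : Nat) : Int) = (ts.length : Int) - (m : Int) := by
        simp [List.length_drop]; omega
      rw [if_pos (by rw [hd]; omega), hd]
      have harith : (ts.length : Int) - 0 + (m : Int) - 1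
          = ((ts.length : Int) - (m : Int) - 0 + (m : Int) - 1) + 1 * (m : Int) := by ring
      rw [harith, Int.add_mul_ediv_right _ _ (by omega : (m : Int) ≠ 0)]
      have hge : 0 ≤ ((ts.length : Int) - (m : Int) - 0 + (m : Int) - 1) / (m : Int) :=
        Int.ediv_nonneg (by omega) (by omega)
      omega
  unfold pvBodyB
  rw [PySem.List.pyRange_of_pos _ _ hm', PySem.List.pyRange_of_pos _ _ hm']
  simp only [← hN2]
  rw [hsplit, List.range_succ_eq_map]
  simp only [List.map_cons, List.map_map, List.flatten_cons]
  congr 1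
  · -- head block: slice ts 0 m = take m ts
    have h0 : (0 : Int) + (m : Int) * ((0 : Nat) : Int) = ((0 : Nat) : Int) := by simp
    rw [h0]
    have : PySem.List.slice ts (some ((0 : Nat) : Int)) (some (((0 : Nat) : Int) + (m : Int)))
        = (ts.drop 0).take m := by
      simp
    simp only [Nat.cast_zero] at this ⊢
    rw [this]
    simp
  · -- tail blocks: block k+1 of ts is block k of ts.drop m
    congr 1
    refine List.map_congr_left ?_
    intro k _
    simp only [Function.comp]
    have hL : (0 : Int) + (m : Int) * ((Nat.succ k : Nat) : Int) = ((m * (k + 1) : Nat) : Int) := by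
      push_cast; ring
    have hR : (0 : Int) + (m : Int) * ((k : Nat) : Int) = ((m * k : Nat) : Int) := by
      push_cast; ring
    rw [hL, hR, PySem.List.slice_natCast_add, PySem.List.slice_natCast_add]
    rw [List.drop_drop]
    have : m * (k + 1) = m + m * k := by ring
    rw [this]

lemma pv_main (cs : List Char) (hcs : cs ≠ []) : ∀ (n : Nat) (ts : List Char), ts.length ≤ n →
    (PySem.List.enumerate ts (0 : Int)).map (pvDecB cs) = pvBodyB cs ts := by
  intro n
  induction n with
  | zero =>
    intro ts hts
    have : ts = [] := List.length_eq_zero_iff.mp (by omega)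
    subst this
    simp [PySem.List.enumerate, pvBodyB, PySem.List.pyRange]
  | succ n ih =>
    intro ts hts
    by_cases hnil : ts = []
    · subst hnil
      simp [PySem.List.enumerate, pvBodyB, PySem.List.pyRange]
    · have hm : 0 < cs.length := List.length_pos_iff.mpr hcs
      have hn : 0 < ts.length := List.length_pos_iff.mpr hnil
      rw [pv_peelA cs hcs ts, pv_peelB cs hcs ts hnil,
        ih (ts.drop cs.length) (by simp [List.length_drop]; omega)]

-- ===== VERDICT (by name: the statement is the Claim_ definition above) =====
theorem original_text_spec : Claim_equal_original_text := by
  intro text_list code _ hpre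
  unfold Spec_original_text original_text original_text_alt
  rcases hpre with ⟨hne, -⟩
  by_cases hts : text_list.toList = []
  · rw [if_pos hts]
    simp [hts, PySem.List.pyRange]
    rfl
  · have hcs : code.toList ≠ [] := hne hts
    rw [if_neg hts]
    rw [PySem.List.foldl_pyRange_zero_pyGetD' text_list.toList ' ' (pvStepA code.toList) (-1, [])]
    have h0 : (0 : Nat) % code.toList.length = 0 := Nat.zero_mod _
    have hA := pv_key code.toList hcs text_list.toList 0 []
    simp only [h0, Nat.cast_zero] at hA
    norm_num at hA
    rw [hA]
    rw [pv_main code.toList hcs text_list.toList.length text_list.toList le_rfl]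
    rfl
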